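-- pv_equiv track=rewrite | github.com/sooham/GoogleCodeJam | 2015/problem_B/problem_B.py | solve_test_case
-- ===== SOURCE A (Python) =====
-- def insert(lst, item):
--     """ (list, int) -> Nonetype
--
--     Inserts int item into list lst, such that lst remains reverse sorted.
--
--     Precondition: nearly reverse sorted.
--     """
--     i = 0
--     while i < len(lst) and item < lst[i]:
--         i += 1
--     lst.insert(i, item)
--
-- def solve_test_case(input_list, sort=True, time_elapsed=0):
--     """ (list of int) -> str
--
--     Return the solution to the input input_list. This is done using simple
--     recursion.
--
--     >>> solve_test_case([1, 2, 1, 2])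
--     3
--     """
--     if sort:
--         input_list.sort(reverse=True)
--     finish_time = input_list[0] + time_elapsed
--
--     if input_list[0] <= 3:
--         return finish_time
--
--     a = input_list[0] // 2
--     b = input_list[0] - a
--     del input_list[0]
--     insert(input_list, a)
--     insert(input_list, b)
--     return min(finish_time, solve_test_case(input_list, False, time_elapsed + 1))
-- ===== SOURCE B (Python) =====
-- def solve_test_case(input_list, sort=True, time_elapsed=0):
--     # Iterative batch simulation: splits a whole run of equal front piles per
--     # step and rebuilds the list by a linear merge, instead of one recursive
--     # call + two insertion scans per single split.  Return value only: unlike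
--     # A, B does not mutate input_list.
--     lst = sorted(input_list, reverse=True) if sort else list(input_list)
--     t = time_elapsed
--     best = lst[0] + t
--     while lst[0] > 3:
--         v = lst[0]
--         c = 1
--         while c < len(lst) and lst[c] == v:
--             c += 1
--         a = v // 2
--         b = v - a
--         kids = [b] * c + [a] * c
--         tail = lst[c:]
--         # merge two descending lists, taking from kids on ties
--         merged = []
--         i = j = 0
--         while i < len(kids) and j < len(tail):
--             if kids[i] >= tail[j]:
--                 merged.append(kids[i]); i += 1
--             else:
--                 merged.append(tail[j]); j += 1
--         merged.extend(kids[i:]); merged.extend(tail[j:])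
--         lst = merged
--         t += c
--         best = min(best, lst[0] + t)
--     return best
-- ===== Notes on version B (the rewrite author's own statement) =====
-- stated objective: faster
-- what changed: A simulates one pancake split per recursive call, re-inserting both halves with O(n) insertion scans; B is an iterative loop that splits the whole run of equal front piles in one step and rebuilds the list with a single linear merge, tracking the best finish time in an accumulator.
import Mathlib
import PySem

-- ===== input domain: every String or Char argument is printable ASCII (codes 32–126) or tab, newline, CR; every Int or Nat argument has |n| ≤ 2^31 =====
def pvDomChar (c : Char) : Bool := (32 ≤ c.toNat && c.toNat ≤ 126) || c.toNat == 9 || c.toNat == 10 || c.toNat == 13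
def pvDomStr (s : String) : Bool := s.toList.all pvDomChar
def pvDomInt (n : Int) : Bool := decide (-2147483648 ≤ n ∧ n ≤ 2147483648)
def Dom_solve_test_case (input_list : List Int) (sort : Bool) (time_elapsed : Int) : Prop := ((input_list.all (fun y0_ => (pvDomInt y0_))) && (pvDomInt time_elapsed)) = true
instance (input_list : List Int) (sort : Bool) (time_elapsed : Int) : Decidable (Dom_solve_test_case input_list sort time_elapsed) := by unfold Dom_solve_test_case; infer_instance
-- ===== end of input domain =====

-- B replaces A's one-recursive-call-per-split simulation (two O(n) insertion
-- scans per single split) by an iterative loop that splits a whole run of equal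
-- front piles at once and rebuilds the list with a single linear merge.
-- A sorts / rewrites its list argument in place; B does not mutate it: the
-- equivalence proved here is about the RETURN value only.

-- ===== PORT A =====
-- A's helper insert(lst, item): scan while item < lst[i], insert at i.
def insertA : List Int → Int → List Int
  | [], item => [item]
  | x :: xs, item => if item < x then x :: insertA xs item else item :: x :: xs

-- termination measure for both ports' recursion: Σ max(p-1,0) over the list
def pvMeasure (L : List Int) : Nat := (L.map (fun p => (p - 1).toNat)).sum

theorem pvMeasure_cons (y : Int) (L : List Int) : pvMeasure (y :: L) = (y - 1).toNat + pvMeasure L := by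
  simp [pvMeasure]

theorem pvMeasure_insertA (i : Int) : ∀ (L : List Int), pvMeasure (insertA L i) = (i - 1).toNat + pvMeasure L := by
  intro L
  induction L with
  | nil => simp [insertA, pvMeasure]
  | cons x xs ih =>
    by_cases h : i < x
    · simp only [insertA, if_pos h, pvMeasure_cons, ih]; omega
    · simp only [insertA, if_neg h, pvMeasure_cons]

-- the split of the head decreases the measure (termination of A's recursion)
theorem pvMeasure_stepA (x : Int) (rest : List Int) (hx : ¬ x ≤ 3) :
    pvMeasure (insertA (insertA rest (PySem.Int.floordiv x 2)) (x - PySem.Int.floordiv x 2)) < pvMeasure (x :: rest) := by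
  have h2 : PySem.Int.floordiv x 2 = x / 2 := PySem.Int.floordiv_eq_ediv_of_pos (by norm_num)
  rw [pvMeasure_insertA, pvMeasure_insertA, pvMeasure_cons, h2]
  omega

-- the recursion of A (its internal calls pass sort=False, inlined here);
-- goA [] t corresponds to Python's IndexError, excluded by Pre_.
def goA : List Int → Int → Int
  | [], _ => 0
  | x :: rest, t =>
    if x ≤ 3 then x + t
    else min (x + t)
      (goA (insertA (insertA rest (PySem.Int.floordiv x 2)) (x - PySem.Int.floordiv x 2)) (t + 1))
termination_by L _ => pvMeasure L
decreasing_by exact pvMeasure_stepA _ _ (by assumption)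

def solve_test_case (input_list : List Int) (sort : Bool) (time_elapsed : Int) : Int :=
  let lst := if sort then PySem.List.sorted input_list (fun x => x) true else input_list
  goA lst time_elapsed

-- ===== PORT B =====
-- run length of value v at the front of the list (B's inner while loop)
def countRun (v : Int) : List Int → Nat
  | [] => 0
  | x :: xs => if x = v then countRun v xs + 1 else 0

-- B's linear merge of two descending lists (kids first on ties)
def mergeDesc : List Int → List Int → List Int
  | [], t => t
  | k :: ks, [] => k :: ks
  | k :: ks, h :: t => if h ≤ k then k :: mergeDesc ks (h :: t) else h :: mergeDesc (k :: ks) t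
termination_by a b => a.length + b.length

theorem mergeDesc_nil (T : List Int) : mergeDesc [] T = T := by rw [mergeDesc.eq_def]

theorem mergeDesc_nil' (k : Int) (ks : List Int) : mergeDesc (k :: ks) [] = k :: ks := by
  rw [mergeDesc.eq_def]

theorem mergeDesc_cons (k h : Int) (ks t : List Int) :
    mergeDesc (k :: ks) (h :: t) = if h ≤ k then k :: mergeDesc ks (h :: t) else h :: mergeDesc (k :: ks) t := by
  rw [mergeDesc.eq_def]

theorem pvMeasure_append (K T : List Int) : pvMeasure (K ++ T) = pvMeasure K + pvMeasure T := by
  simp [pvMeasure]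

theorem pvMeasure_mergeDesc : ∀ (K T : List Int), pvMeasure (mergeDesc K T) = pvMeasure K + pvMeasure T := by
  intro K
  induction K with
  | nil => intro T; rw [mergeDesc_nil]; simp [pvMeasure]
  | cons k ks ihk =>
    intro T
    induction T with
    | nil => rw [mergeDesc_nil']; simp [pvMeasure]
    | cons h t iht =>
      by_cases hc : h ≤ k
      · simp only [mergeDesc_cons, if_pos hc, pvMeasure_cons, ihk]; omega
      · simp only [mergeDesc_cons, if_neg hc, pvMeasure_cons] at iht ⊢
        omega

theorem pvMeasure_replicate (n : Nat) (y : Int) : pvMeasure (List.replicate n y) = n * (y - 1).toNat := by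
  induction n with
  | zero => simp [pvMeasure]
  | succ m ih => rw [List.replicate_succ, pvMeasure_cons, ih]; ring

theorem run_split (v : Int) : ∀ (L : List Int), List.replicate (countRun v L) v ++ L.drop (countRun v L) = L := by
  intro L
  induction L with
  | nil => simp [countRun]
  | cons x xs ih =>
    by_cases h : x = v
    · subst h; simp [countRun, List.replicate_succ, ih]
    · simp [countRun, h]

-- the batch split of the whole front run decreases the measure (termination of B's loop)
theorem pvMeasure_stepB (x : Int) (rest : List Int) (hx : ¬ x ≤ 3) :
    pvMeasure (mergeDesc
        (List.replicate (countRun x rest + 1) (x - PySem.Int.floordiv x 2) ++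
          List.replicate (countRun x rest + 1) (PySem.Int.floordiv x 2))
        ((x :: rest).drop (countRun x rest + 1))) < pvMeasure (x :: rest) := by
  have h2 : PySem.Int.floordiv x 2 = x / 2 := PySem.Int.floordiv_eq_ediv_of_pos (by norm_num)
  have hrest : pvMeasure rest = countRun x rest * (x - 1).toNat + pvMeasure (rest.drop (countRun x rest)) := by
    conv_lhs => rw [← run_split x rest]
    rw [pvMeasure_append, pvMeasure_replicate]
  rw [pvMeasure_mergeDesc, pvMeasure_append, pvMeasure_replicate, pvMeasure_replicate,
    List.drop_succ_cons, pvMeasure_cons, hrest, h2]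
  have hx2 : (x - x / 2 - 1).toNat + (x / 2 - 1).toNat < (x - 1).toNat := by omega
  have hmul : (countRun x rest + 1) * ((x - x / 2 - 1).toNat + (x / 2 - 1).toNat)
      < (countRun x rest + 1) * (x - 1).toNat :=
    mul_lt_mul_of_pos_left hx2 (Nat.succ_pos _)
  have expand : (countRun x rest + 1) * ((x - x / 2 - 1).toNat + (x / 2 - 1).toNat)
      = (countRun x rest + 1) * (x - x / 2 - 1).toNat + (countRun x rest + 1) * (x / 2 - 1).toNat :=
    Nat.mul_add _ _ _
  have expand2 : (countRun x rest + 1) * (x - 1).toNat = (x - 1).toNat + countRun x rest * (x - 1).toNat := by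
    ring
  omega

-- B's main loop: split the whole front run, merge children back, track best.
def goB : List Int → Int → Int → Int
  | [], _, best => best
  | x :: rest, t, best =>
    if x ≤ 3 then best
    else
      goB (mergeDesc
            (List.replicate (countRun x rest + 1) (x - PySem.Int.floordiv x 2) ++
              List.replicate (countRun x rest + 1) (PySem.Int.floordiv x 2))
            ((x :: rest).drop (countRun x rest + 1)))
        (t + ((countRun x rest + 1 : Nat) : Int))
        (min best ((mergeDesc
            (List.replicate (countRun x rest + 1) (x - PySem.Int.floordiv x 2) ++
              List.replicate (countRun x rest + 1) (PySem.Int.floordiv x 2))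
            ((x :: rest).drop (countRun x rest + 1))).headD 0 + (t + ((countRun x rest + 1 : Nat) : Int))))
termination_by L _ _ => pvMeasure L
decreasing_by exact pvMeasure_stepB _ _ (by assumption)

def solve_test_case_alt (input_list : List Int) (sort : Bool) (time_elapsed : Int) : Int :=
  let lst := if sort then PySem.List.sorted input_list (fun x => x) true else input_list
  match lst with
  | [] => 0   -- Python raises IndexError here; excluded by Pre_
  | x :: rest => goB (x :: rest) time_elapsed (x + time_elapsed)

-- ===== PRECONDITION & SPEC =====
-- Pre_ excludes only the empty list, on which both Pythons raise IndexError.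
def Pre_solve_test_case (input_list : List Int) (sort : Bool) (time_elapsed : Int) : Prop := input_list ≠ []
instance (input_list : List Int) (sort : Bool) (time_elapsed : Int) : Decidable (Pre_solve_test_case input_list sort time_elapsed) := by unfold Pre_solve_test_case; infer_instance
def pvWitness_solve_test_case : List Int × Bool × Int := ([2, 5, 1], true, 0)

def Spec_solve_test_case (input_list : List Int) (sort : Bool) (time_elapsed : Int) (out : Int) : Prop := out = solve_test_case_alt input_list sort time_elapsed
instance (input_list : List Int) (sort : Bool) (time_elapsed : Int) (out : Int) : Decidable (Spec_solve_test_case input_list sort time_elapsed out) := by unfold Spec_solve_test_case; infer_instance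

-- ===== CLAIM (what is proved, stated in full; the proofs are below) =====
def Claim_equal_solve_test_case : Prop := ∀ (input_list : List Int) (sort : Bool) (time_elapsed : Int), Dom_solve_test_case input_list sort time_elapsed → Pre_solve_test_case input_list sort time_elapsed → Spec_solve_test_case input_list sort time_elapsed (solve_test_case input_list sort time_elapsed)

-- ===== LEMMAS AND PROOFS =====

theorem goA_cons (x : Int) (rest : List Int) (t : Int) :
    goA (x :: rest) t = if x ≤ 3 then x + t
      else min (x + t)
        (goA (insertA (insertA rest (PySem.Int.floordiv x 2)) (x - PySem.Int.floordiv x 2)) (t + 1)) := by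
  rw [goA.eq_def]

theorem goB_cons (x : Int) (rest : List Int) (t best : Int) :
    goB (x :: rest) t best = if x ≤ 3 then best
      else
        goB (mergeDesc
              (List.replicate (countRun x rest + 1) (x - PySem.Int.floordiv x 2) ++
                List.replicate (countRun x rest + 1) (PySem.Int.floordiv x 2))
              ((x :: rest).drop (countRun x rest + 1)))
          (t + ((countRun x rest + 1 : Nat) : Int))
          (min best ((mergeDesc
              (List.replicate (countRun x rest + 1) (x - PySem.Int.floordiv x 2) ++
                List.replicate (countRun x rest + 1) (PySem.Int.floordiv x 2))
              ((x :: rest).drop (countRun x rest + 1))).headD 0 + (t + ((countRun x rest + 1 : Nat) : Int)))) := by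
  rw [goB.eq_def]

theorem goA_le (x t : Int) (rest : List Int) : goA (x :: rest) t ≤ x + t := by
  rw [goA_cons]
  split
  · exact le_refl _
  · exact min_le_left _ _

theorem insertA_comm (i j : Int) : ∀ (L : List Int), insertA (insertA L i) j = insertA (insertA L j) i := by
  intro L
  induction L with
  | nil =>
    simp only [insertA]
    rcases lt_trichotomy i j with h | h | h
    · simp [insertA, h, not_lt.mpr (le_of_lt h)]
    · subst h; rfl
    · simp [insertA, h, not_lt.mpr (le_of_lt h)]
  | cons x xs ih =>
    by_cases hi : i < x <;> by_cases hj : j < x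
    · simp [insertA, hi, hj, ih]
    · have hij : i < j := by omega
      simp [insertA, hi, hj, hij, not_lt.mpr (le_of_lt hij)]
    · have hji : j < i := by omega
      simp [insertA, hi, hj, hji, not_lt.mpr (le_of_lt hji)]
    · rcases lt_trichotomy i j with h | h | h
      · simp [insertA, hi, hj, h, not_lt.mpr (le_of_lt h)]
      · subst h; rfl
      · simp [insertA, hi, hj, h, not_lt.mpr (le_of_lt h)]

theorem insertA_of_le (k : Int) (ks : List Int) (h : ∀ y ∈ ks, y ≤ k) : insertA ks k = k :: ks := by
  cases ks with
  | nil => rfl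
  | cons y ys => simp [insertA, not_lt.mpr (h y (by simp))]

theorem insertA_replicate_big (v i : Int) (h : i < v) : ∀ (k : Nat) (T : List Int), insertA (List.replicate k v ++ T) i = List.replicate k v ++ insertA T i := by
  intro k
  induction k with
  | zero => simp
  | succ m ih => intro T; simp [List.replicate_succ, insertA, h, ih]

theorem mergeDesc_insertA (k : Int) : ∀ (T ks : List Int), (∀ y ∈ ks, y ≤ k) → mergeDesc (k :: ks) T = insertA (mergeDesc ks T) k := by
  intro T
  induction T with
  | nil =>
    intro ks hk
    rw [mergeDesc_nil']
    cases ks with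
    | nil => rw [mergeDesc_nil]; rfl
    | cons k' ks' => rw [mergeDesc_nil', insertA_of_le k _ hk]
  | cons h t iht =>
    intro ks hk
    by_cases hhk : h ≤ k
    · cases ks with
      | nil =>
        rw [mergeDesc_cons, if_pos hhk, mergeDesc_nil]
        simp [insertA, not_lt.mpr hhk]
      | cons k' ks' =>
        have hk' : k' ≤ k := hk k' (by simp)
        by_cases h2 : h ≤ k'
        · rw [mergeDesc_cons, if_pos hhk, mergeDesc_cons, if_pos h2]
          simp [insertA, not_lt.mpr hk']
        · rw [mergeDesc_cons, if_pos hhk, mergeDesc_cons, if_neg h2]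
          simp [insertA, not_lt.mpr hhk]
    · have hstep : mergeDesc ks (h :: t) = h :: mergeDesc ks t := by
        cases ks with
        | nil => rw [mergeDesc_nil, mergeDesc_nil]
        | cons k' ks' =>
          have hno : ¬ h ≤ k' := by have := hk k' (by simp); omega
          rw [mergeDesc_cons, if_neg hno]
      have hkh : k < h := by omega
      rw [mergeDesc_cons, if_neg hhk, hstep, iht ks hk]
      simp [insertA, hkh]

theorem mergeDesc_replicate (a b : Int) (hab : a ≤ b) : ∀ (m n : Nat) (T : List Int), mergeDesc (List.replicate m b ++ List.replicate n a) T = (fun X => insertA X b)^[m] ((fun X => insertA X a)^[n] T) := by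
  have base : ∀ (n : Nat) (T : List Int), mergeDesc (List.replicate n a) T = (fun X => insertA X a)^[n] T := by
    intro n
    induction n with
    | zero => intro T; rw [List.replicate_zero, mergeDesc_nil]; rfl
    | succ m ih =>
      intro T
      rw [List.replicate_succ, mergeDesc_insertA a T _ (by intro y hy; simp at hy; omega), ih,
        Function.iterate_succ_apply']
  intro m
  induction m with
  | zero => intro n T; simpa using base n T
  | succ m ih =>
    intro n T
    rw [List.replicate_succ, List.cons_append,
      mergeDesc_insertA b T _ (by intro y hy; simp at hy; rcases hy with h | h <;> omega),
      ih, Function.iterate_succ_apply']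

theorem iter_insertA_comm (a b : Int) : ∀ (n : Nat) (X : List Int), (fun X => insertA X a)^[n] (insertA X b) = insertA ((fun X => insertA X a)^[n] X) b := by
  intro n
  induction n with
  | zero => intro X; rfl
  | succ m ih =>
    intro X
    rw [Function.iterate_succ_apply, insertA_comm b a X, ih, ← Function.iterate_succ_apply]

theorem ins2_iter (a b : Int) : ∀ (c : Nat) (T : List Int), (fun X => insertA (insertA X a) b)^[c] T = (fun X => insertA X b)^[c] ((fun X => insertA X a)^[c] T) := by
  intro c
  induction c with
  | zero => intro T; rfl
  | succ m ih =>
    intro T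
    rw [Function.iterate_succ_apply, ih, iter_insertA_comm, Function.iterate_succ_apply,
      Function.iterate_succ_apply', iter_insertA_comm a a]

theorem goA_batch (v : Int) (hv : ¬ v ≤ 3) : ∀ (c : Nat) (t : Int) (T : List Int), goA (List.replicate (c + 1) v ++ T) t = min (v + t) (goA ((fun X => insertA (insertA X (PySem.Int.floordiv v 2)) (v - PySem.Int.floordiv v 2))^[c + 1] T) (t + ((c + 1 : Nat) : Int))) := by
  have h2 : PySem.Int.floordiv v 2 = v / 2 := PySem.Int.floordiv_eq_ediv_of_pos (by norm_num)
  have ha : PySem.Int.floordiv v 2 < v := by rw [h2]; omega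
  have hb : v - PySem.Int.floordiv v 2 < v := by rw [h2]; omega
  intro c
  induction c with
  | zero =>
    intro t T
    rw [show List.replicate (0 + 1) v ++ T = v :: T from by simp]
    rw [goA_cons, if_neg hv]
    norm_num
  | succ m ih =>
    intro t T
    rw [show List.replicate (m + 1 + 1) v ++ T = v :: (List.replicate (m + 1) v ++ T) from by
      rw [← List.cons_append, ← List.replicate_succ]]
    rw [goA_cons, if_neg hv]
    rw [insertA_replicate_big v _ ha, insertA_replicate_big v _ hb]
    rw [ih (t + 1) (insertA (insertA T (PySem.Int.floordiv v 2)) (v - PySem.Int.floordiv v 2))]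
    rw [← Function.iterate_succ_apply]
    have harith : (t + 1) + ((m + 1 : Nat) : Int) = t + ((m + 1 + 1 : Nat) : Int) := by push_cast; ring
    rw [harith]
    generalize goA ((fun X => insertA (insertA X (PySem.Int.floordiv v 2)) (v - PySem.Int.floordiv v 2))^[m + 1 + 1] T) (t + ((m + 1 + 1 : Nat) : Int)) = G
    omega

theorem mergeDesc_ne_nil (k : Int) (ks T : List Int) : mergeDesc (k :: ks) T ≠ [] := by
  cases T with
  | nil => simp [mergeDesc_nil']
  | cons h t =>
    rw [mergeDesc_cons]
    split <;> simp

theorem goB_eq : ∀ (n : Nat) (L : List Int) (t best : Int), pvMeasure L ≤ n → L ≠ [] → best ≤ L.headD 0 + t → goB L t best = min best (goA L t) := by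
  intro n
  induction n with
  | zero =>
    intro L t best hm hne hb
    cases L with
    | nil => exact absurd rfl hne
    | cons x rest =>
      by_cases hx : x ≤ 3
      · rw [goB_cons, goA_cons, if_pos hx, if_pos hx]
        simp at hb
        omega
      · exfalso
        rw [pvMeasure_cons] at hm
        omega
  | succ n ih =>
    intro L t best hm hne hb
    cases L with
    | nil => exact absurd rfl hne
    | cons x rest =>
      by_cases hx : x ≤ 3
      · rw [goB_cons, goA_cons, if_pos hx, if_pos hx]
        simp at hb
        omega
      · have h2 : PySem.Int.floordiv x 2 = x / 2 := PySem.Int.floordiv_eq_ediv_of_pos (by norm_num)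
        have hab0 : PySem.Int.floordiv x 2 ≤ x - PySem.Int.floordiv x 2 := by rw [h2]; omega
        set c0 := countRun x rest with hc0
        set a := PySem.Int.floordiv x 2 with hadef
        set b := x - a with hbdef
        set T := (x :: rest).drop (c0 + 1) with hT
        set lst' := mergeDesc (List.replicate (c0 + 1) b ++ List.replicate (c0 + 1) a) T with hlst'
        have hab : a ≤ b := hab0
        have hgoB : goB (x :: rest) t best = goB lst' (t + ((c0 + 1 : Nat) : Int)) (min best (lst'.headD 0 + (t + ((c0 + 1 : Nat) : Int)))) := by
          rw [goB_cons, if_neg hx]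
        have hsplit : x :: rest = List.replicate (c0 + 1) x ++ T := by
          rw [hT]
          simp only [List.drop_succ_cons, List.replicate_succ, List.cons_append]
          rw [hc0, run_split x rest]
        have hmerge : lst' = (fun X => insertA (insertA X a) b)^[c0 + 1] T := by
          rw [hlst', mergeDesc_replicate a b hab, ins2_iter]
        have hAbatch : goA (x :: rest) t = min (x + t) (goA lst' (t + ((c0 + 1 : Nat) : Int))) := by
          conv_lhs => rw [hsplit]
          rw [goA_batch x hx c0 t T, hmerge]
        have hne' : lst' ≠ [] := by
          rw [hlst', List.replicate_succ, List.cons_append]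
          exact mergeDesc_ne_nil _ _ _
        have hmlt : pvMeasure lst' < pvMeasure (x :: rest) := by
          rw [hlst', hT, hadef, hbdef, hadef]
          exact pvMeasure_stepB x rest hx
        have hIH := ih lst' (t + ((c0 + 1 : Nat) : Int)) (min best (lst'.headD 0 + (t + ((c0 + 1 : Nat) : Int)))) (by omega) hne' (min_le_right _ _)
        have hGle : goA lst' (t + ((c0 + 1 : Nat) : Int)) ≤ lst'.headD 0 + (t + ((c0 + 1 : Nat) : Int)) := by
          cases lst'' : lst' with
          | nil => exact absurd lst'' hne'
          | cons y ys => simpa using goA_le y (t + ((c0 + 1 : Nat) : Int)) ys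
        rw [hgoB, hIH, hAbatch]
        have hbx : best ≤ x + t := by simpa using hb
        generalize goA lst' (t + ((c0 + 1 : Nat) : Int)) = G at hGle ⊢
        generalize List.headD lst' 0 = hd at hGle ⊢
        omega

-- ===== VERDICT (by name: the statement is the Claim_ definition above) =====
theorem solve_test_case_spec : Claim_equal_solve_test_case := by
  intro input_list sort time_elapsed _ hpre
  unfold Spec_solve_test_case solve_test_case solve_test_case_alt
  have hne : (if sort then PySem.List.sorted input_list (fun x => x) true else input_list) ≠ [] := by
    cases sort
    · simpa using hpre
    · simp only [if_true]
      rw [Ne, PySem.List.sorted_eq_nil_iff]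
      exact hpre
  cases hL : (if sort then PySem.List.sorted input_list (fun x => x) true else input_list) with
  | nil => exact absurd hL hne
  | cons x rest =>
    show goA (x :: rest) time_elapsed = goB (x :: rest) time_elapsed (x + time_elapsed)
    have := goB_eq (pvMeasure (x :: rest)) (x :: rest) time_elapsed (x + time_elapsed) (le_refl _) (by simp) (by simp)
    rw [this]
    have hle := goA_le x time_elapsed rest
    omega
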